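-- pv_equiv track=rewrite | github.com/Mustufa-Baig/Acl | Scripts/pre_loader.py | cache_conditional_jumps
-- ===== SOURCE A (Python) =====
-- def cache_conditional_jumps(lines):
--     ifc=[]
--     cond={}
--     i=0
--     for line in lines:
--         if line[0]=='if':
--             ifc.append(i)
--             cond[i]=[]
--         elif line[0]=='else':
--             cond[ifc[-1]].append(i)
--         elif line[0]=='end':
--             cond[ifc.pop()].append(i)
--         i+=1
--     return cond
-- ===== SOURCE B (Python) =====
-- def cache_conditional_jumps(lines):
--     # Recursive-descent parser over the line list instead of an explicit if-stack.
--     cond = {}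
--     n = len(lines)
--
--     def parse_block(start, i):
--         # parses the body of the 'if' at position start; returns index after its 'end'
--         cond[start] = []
--         while i < n:
--             head = lines[i][0]
--             if head == 'if':
--                 i = parse_block(i, i + 1)
--             elif head == 'else':
--                 cond[start].append(i)
--                 i += 1
--             elif head == 'end':
--                 cond[start].append(i)
--                 return i + 1
--             else:
--                 i += 1
--         return i
--
--     i = 0
--     while i < n:
--         if lines[i][0] == 'if':
--             i = parse_block(i, i + 1)
--         else:
--             i += 1
--     return cond
-- ===== Notes on version B (the rewrite author's own statement) =====
-- stated objective: alternative
-- what changed: Replaces A's single pass with an explicit if-stack by a recursive-descent parser: a helper parses one if-block (recursing on nested ifs, collecting its else positions and its end), driven by a top-level scan over the line list.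
import Mathlib
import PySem

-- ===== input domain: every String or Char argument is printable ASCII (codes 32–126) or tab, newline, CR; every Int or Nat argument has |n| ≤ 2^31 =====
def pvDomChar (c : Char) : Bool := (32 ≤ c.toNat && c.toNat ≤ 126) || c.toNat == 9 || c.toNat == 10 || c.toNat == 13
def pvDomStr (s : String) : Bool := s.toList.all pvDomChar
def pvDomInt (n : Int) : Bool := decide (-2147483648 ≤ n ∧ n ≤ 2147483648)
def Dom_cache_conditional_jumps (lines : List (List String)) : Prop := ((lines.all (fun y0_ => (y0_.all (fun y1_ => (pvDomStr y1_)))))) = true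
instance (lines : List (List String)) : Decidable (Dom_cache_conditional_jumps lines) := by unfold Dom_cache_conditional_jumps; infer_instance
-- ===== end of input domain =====

-- B replaces A's explicit if-stack scan by a recursive-descent block parser (same cost); equivalence is about the return value.

-- ===== PORT A =====
-- One fold step of A's for-loop; state = (ifc, cond, i), none = IndexError already raised.
def stepA (acc : Option (List Int × PySem.Dict Int (List Int) × Int)) (line : List String) :
    Option (List Int × PySem.Dict Int (List Int) × Int) :=
  acc.bind fun s =>
    match PySem.List.pyGet? line 0 with          -- line[0]; none = IndexError on an empty line
    | none => none
    | some h =>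
      if h = "if" then some (s.1 ++ [s.2.2], s.2.1.insert s.2.2 [], s.2.2 + 1)
      else if h = "else" then
        match s.1.getLast? with                  -- ifc[-1]; none = IndexError on empty stack
        | none => none
        | some k => some (s.1, s.2.1.modify k [] (· ++ [s.2.2]), s.2.2 + 1)
      else if h = "end" then
        match s.1.getLast? with                  -- ifc.pop(); none = IndexError on empty stack
        | none => none
        | some k => some (s.1.dropLast, s.2.1.modify k [] (· ++ [s.2.2]), s.2.2 + 1)
      else some (s.1, s.2.1, s.2.2 + 1)

def pvEx (o : Option (List Int × PySem.Dict Int (List Int) × Int)) : List (Int × List Int) :=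
  match o with
  | some s => s.2.1.items
  | none => []                                   -- unreachable under Pre_ (Python raised)

def cache_conditional_jumps (lines : List (List String)) : List (Int × List Int) :=
  pvEx (lines.foldl stepA (some ([], PySem.Dict.empty, 0)))

-- ===== PORT B =====
-- The while-loop of parse_block; rest is the suffix of lines from index i; fuel only guards
-- totality (any fuel ≥ rest.length is enough).  Returns (i', remaining suffix, cond).
def pbLoop : Nat → Int → Int → List (List String) → PySem.Dict Int (List Int) →
    Int × List (List String) × PySem.Dict Int (List Int)
  | 0, _, i, rest, cond => (i, rest, cond)
  | _+1, _, i, [], cond => (i, [], cond)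
  | f+1, start, i, line :: rs, cond =>
    let h := line.head?.getD ""                  -- lines[i][0] (empty lines are outside Pre_)
    if h = "if" then
      -- parse_block(i, i+1): its entry does cond[i] = []
      let r := pbLoop f i (i+1) rs (cond.insert i [])
      pbLoop f start r.1 r.2.1 r.2.2
    else if h = "else" then
      pbLoop f start (i+1) rs (cond.modify start [] (· ++ [i]))
    else if h = "end" then
      (i + 1, rs, cond.modify start [] (· ++ [i]))
    else
      pbLoop f start (i+1) rs cond

-- The top-level while-loop of B.
def topB : Nat → Int → List (List String) → PySem.Dict Int (List Int) → PySem.Dict Int (List Int)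
  | 0, _, _, cond => cond
  | _+1, _, [], cond => cond
  | f+1, i, line :: rs, cond =>
    if line.head?.getD "" = "if" then
      let r := pbLoop f i (i+1) rs (cond.insert i [])
      topB f r.1 r.2.1 r.2.2
    else topB f (i+1) rs cond

def cache_conditional_jumps_alt (lines : List (List String)) : List (Int × List Int) :=
  (topB (lines.length + 1) 0 lines PySem.Dict.empty).items

-- ===== PRECONDITION & SPEC =====
def pvIsBranch (line : List String) : Prop := line.head? = some "else" ∨ line.head? = some "end"

def pvCntIf (l : List (List String)) : Nat := l.countP (fun line => line.head? == some "if")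
def pvCntEnd (l : List (List String)) : Nat := l.countP (fun line => line.head? == some "end")

-- Pre_ excludes exactly the inputs on which A raises IndexError: a line that is the empty list
-- (line[0]), or an 'else'/'end' line preceded by at most as many 'if's as 'end's (empty ifc stack).
def Pre_cache_conditional_jumps (lines : List (List String)) : Prop :=
  (∀ l ∈ lines, l ≠ []) ∧
  ∀ j < lines.length, pvIsBranch ((lines.drop j).headD []) →
    pvCntEnd (lines.take j) < pvCntIf (lines.take j)

instance (lines : List (List String)) : Decidable (Pre_cache_conditional_jumps lines) := by
  unfold Pre_cache_conditional_jumps pvIsBranch; infer_instance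

def pvWitness_cache_conditional_jumps : List (List String) :=
  [["if"], ["mov", "x"], ["else"], ["end"], ["add"]]

def Spec_cache_conditional_jumps (lines : List (List String)) (out : List (Int × List Int)) : Prop :=
  out = cache_conditional_jumps_alt lines

instance (lines : List (List String)) (out : List (Int × List Int)) :
    Decidable (Spec_cache_conditional_jumps lines out) := by
  unfold Spec_cache_conditional_jumps; infer_instance

-- ===== CLAIM (what is proved, stated in full; the proofs are below) =====
def Claim_equal_cache_conditional_jumps : Prop :=
  ∀ (lines : List (List String)), Dom_cache_conditional_jumps lines →
    Pre_cache_conditional_jumps lines →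
    Spec_cache_conditional_jumps lines (cache_conditional_jumps lines)

-- ===== LEMMAS AND PROOFS =====

-- nesting-depth well-formedness of a suffix: d open blocks, every 'else'/'end' finds one
def POk : Nat → List (List String) → Prop
  | _, [] => True
  | d, line :: rs =>
    if line.head? = some "if" then POk (d+1) rs
    else if line.head? = some "else" then 0 < d ∧ POk d rs
    else if line.head? = some "end" then 0 < d ∧ POk (d-1) rs
    else POk d rs

lemma pre_to_POk : ∀ (rest : List (List String)) (d : Nat),
    (∀ j < rest.length, pvIsBranch ((rest.drop j).headD []) →
      pvCntEnd (rest.take j) < pvCntIf (rest.take j) + d) →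
    POk d rest := by
  intro rest
  induction rest with
  | nil => intro d _; trivial
  | cons line rs ih =>
    intro d h
    have h0 := h 0 (by simp) 
    have hshift : ∀ j < rs.length, pvIsBranch ((rs.drop j).headD []) →
        pvCntEnd (rs.take j) + pvCntEnd [line] < pvCntIf (rs.take j) + pvCntIf [line] + d := by
      intro j hj hb
      have := h (j+1) (by simp; omega) (by simpa using hb)
      simpa [pvCntIf, pvCntEnd, List.countP_cons, Nat.add_comm] using this
    unfold POk
    split_ifs with h1 h2 h3
    · refine ih (d+1) ?_
      intro j hj hb
      have := hshift j hj hb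
      simp [pvCntIf, pvCntEnd, h1] at this ⊢
      omega
    · have hd : 0 < d := by
        have := h0 (by simp [pvIsBranch, h2])
        simpa [pvCntIf, pvCntEnd] using this
      refine ⟨hd, ih d ?_⟩
      intro j hj hb
      have := hshift j hj hb
      simp [pvCntIf, pvCntEnd, h2] at this ⊢
      omega
    · have hd : 0 < d := by
        have := h0 (by simp [pvIsBranch, h3])
        simpa [pvCntIf, pvCntEnd] using this
      refine ⟨hd, ih (d-1) ?_⟩
      intro j hj hb
      have := hshift j hj hb
      simp [pvCntIf, pvCntEnd, h3] at this ⊢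
      omega
    · refine ih d ?_
      intro j hj hb
      have := hshift j hj hb
      simp [pvCntIf, pvCntEnd, h1, h3] at this ⊢
      omega

-- head? from the Python-side test on line[0]/head?.getD ""
lemma head_of_getD {line : List String} {s : String} (hs : s ≠ "")
    (h : line.head?.getD "" = s) : line.head? = some s := by
  cases hl : line.head? with
  | none => rw [hl] at h; simp at h; exact (hs h).elim
  | some t => rw [hl] at h; simpa using h

lemma pb_spec : ∀ (f : Nat) (rest : List (List String)), rest.length ≤ f →
    ∀ (k i : Int) (cond : PySem.Dict Int (List Int)) (stack : List Int),
      ((pbLoop f k i rest cond).2.1 <:+ rest) ∧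
      (∀ d, POk (d+1) rest → POk d (pbLoop f k i rest cond).2.1) ∧
      ((∀ l ∈ rest, l ≠ []) →
        pvEx (rest.foldl stepA (some (stack ++ [k], cond, i))) =
          pvEx ((pbLoop f k i rest cond).2.1.foldl stepA
            (some (stack, (pbLoop f k i rest cond).2.2, (pbLoop f k i rest cond).1)))) := by
  intro f
  induction f with
  | zero =>
    intro rest hlen k i cond stack
    have : rest = [] := List.eq_nil_of_length_eq_zero (by omega)
    subst this
    exact ⟨List.suffix_rfl, fun d _ => trivial, fun _ => rfl⟩
  | succ f ih =>
    intro rest hlen k i cond stack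
    match rest with
    | [] => exact ⟨List.suffix_rfl, fun d _ => trivial, fun _ => rfl⟩
    | line :: rs =>
      have hrs : rs.length ≤ f := by simpa using hlen
      have hcons : rs <:+ line :: rs := List.suffix_cons line rs
      by_cases h1 : line.head?.getD "" = "if"
      · have hhd : line.head? = some "if" := head_of_getD (by decide) h1
        have hget : PySem.List.pyGet? line 0 = some "if" := by
          rw [PySem.List.pyGet?_zero, ← List.head?_eq_getElem?, hhd]
        obtain ⟨hsuf1, hok1, heq1⟩ := ih rs hrs i (i+1) (cond.insert i []) (stack ++ [k])
        obtain ⟨hsuf2, hok2, heq2⟩ := ih (pbLoop f i (i+1) rs (cond.insert i [])).2.1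
          (le_trans hsuf1.length_le hrs) k (pbLoop f i (i+1) rs (cond.insert i [])).1
          (pbLoop f i (i+1) rs (cond.insert i [])).2.2 stack
        have hred : pbLoop (f+1) k i (line :: rs) cond
            = pbLoop f k (pbLoop f i (i+1) rs (cond.insert i [])).1
                (pbLoop f i (i+1) rs (cond.insert i [])).2.1
                (pbLoop f i (i+1) rs (cond.insert i [])).2.2 := by
          simp only [pbLoop, h1]; simp
        rw [hred]
        refine ⟨(hsuf2.trans hsuf1).trans hcons, ?_, ?_⟩
        · intro d hok
          have hok' : POk (d+2) rs := by simpa [POk, hhd] using hok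
          exact hok2 d (hok1 (d+1) hok')
        · intro hne
          have hnrs : ∀ l ∈ rs, l ≠ [] := fun l hl => hne l (by simp [hl])
          rw [List.foldl_cons]
          have hstep : stepA (some (stack ++ [k], cond, i)) line
              = some ((stack ++ [k]) ++ [i], cond.insert i [], i + 1) := by
            simp [stepA, hget]
          rw [hstep, heq1 hnrs, heq2 (fun l hl => hnrs l (hsuf1.mem hl))]
      · by_cases h2 : line.head?.getD "" = "else"
        · have hhd : line.head? = some "else" := head_of_getD (by decide) h2
          have hget : PySem.List.pyGet? line 0 = some "else" := by
            rw [PySem.List.pyGet?_zero, ← List.head?_eq_getElem?, hhd]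
          obtain ⟨hsuf1, hok1, heq1⟩ := ih rs hrs k (i+1) (cond.modify k [] (· ++ [i])) stack
          have hred : pbLoop (f+1) k i (line :: rs) cond
              = pbLoop f k (i+1) rs (cond.modify k [] (· ++ [i])) := by
            simp only [pbLoop, h2]; simp
          rw [hred]
          refine ⟨hsuf1.trans hcons, ?_, ?_⟩
          · intro d hok
            exact hok1 d (by simpa [POk, hhd] using hok)
          · intro hne
            have hnrs : ∀ l ∈ rs, l ≠ [] := fun l hl => hne l (by simp [hl])
            rw [List.foldl_cons]
            have hstep : stepA (some (stack ++ [k], cond, i)) line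
                = some (stack ++ [k], cond.modify k [] (· ++ [i]), i + 1) := by
              simp [stepA, hget]
            rw [hstep, heq1 hnrs]
        · by_cases h3 : line.head?.getD "" = "end"
          · have hhd : line.head? = some "end" := head_of_getD (by decide) h3
            have hget : PySem.List.pyGet? line 0 = some "end" := by
              rw [PySem.List.pyGet?_zero, ← List.head?_eq_getElem?, hhd]
            have hred : pbLoop (f+1) k i (line :: rs) cond
                = (i + 1, rs, cond.modify k [] (· ++ [i])) := by
              simp only [pbLoop, h3]; simp
            rw [hred]
            refine ⟨hcons, ?_, ?_⟩
            · intro d hok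
              simpa [POk, hhd] using hok
            · intro hne
              rw [List.foldl_cons]
              have hstep : stepA (some (stack ++ [k], cond, i)) line
                  = some (stack, cond.modify k [] (· ++ [i]), i + 1) := by
                simp [stepA, hget]
              rw [hstep]
          · obtain ⟨hsuf1, hok1, heq1⟩ := ih rs hrs k (i+1) cond stack
            have hred : pbLoop (f+1) k i (line :: rs) cond = pbLoop f k (i+1) rs cond := by
              simp only [pbLoop, h1, h2, h3]; simp
            rw [hred]
            refine ⟨hsuf1.trans hcons, ?_, ?_⟩
            · intro d hok
              refine hok1 d ?_
              cases hl : line.head? with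
              | none => simpa [POk, hl] using hok
              | some t =>
                have ht1 : t ≠ "if" := fun h => h1 (by simp [hl, h])
                have ht2 : t ≠ "else" := fun h => h2 (by simp [hl, h])
                have ht3 : t ≠ "end" := fun h => h3 (by simp [hl, h])
                simpa [POk, hl, ht1, ht2, ht3] using hok
            · intro hne
              have hnrs : ∀ l ∈ rs, l ≠ [] := fun l hl => hne l (by simp [hl])
              have hline : line ≠ [] := hne line (by simp)
              obtain ⟨t, hl⟩ : ∃ t, line.head? = some t := by
                cases hl : line.head? with
                | none => exact absurd (List.head?_eq_none_iff.mp hl) hline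
                | some t => exact ⟨t, rfl⟩
              have ht1 : t ≠ "if" := fun h => h1 (by simp [hl, h])
              have ht2 : t ≠ "else" := fun h => h2 (by simp [hl, h])
              have ht3 : t ≠ "end" := fun h => h3 (by simp [hl, h])
              have hget : PySem.List.pyGet? line 0 = some t := by
                rw [PySem.List.pyGet?_zero, ← List.head?_eq_getElem?, hl]
              rw [List.foldl_cons]
              have hstep : stepA (some (stack ++ [k], cond, i)) line
                  = some (stack ++ [k], cond, i + 1) := by
                simp [stepA, hget, ht1, ht2, ht3]
              rw [hstep, heq1 hnrs]

lemma top_spec : ∀ (f : Nat) (rest : List (List String)), rest.length ≤ f →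
    (∀ l ∈ rest, l ≠ []) → POk 0 rest →
    ∀ (i : Int) (cond : PySem.Dict Int (List Int)),
      pvEx (rest.foldl stepA (some (([] : List Int), cond, i))) = (topB f i rest cond).items := by
  intro f
  induction f with
  | zero =>
    intro rest hlen _ _ i cond
    have : rest = [] := List.eq_nil_of_length_eq_zero (by omega)
    subst this; rfl
  | succ f ih =>
    intro rest hlen hne hok i cond
    match rest with
    | [] => rfl
    | line :: rs =>
      have hrs : rs.length ≤ f := by simpa using hlen
      have hnrs : ∀ l ∈ rs, l ≠ [] := fun l hl => hne l (by simp [hl])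
      have hline : line ≠ [] := hne line (by simp)
      obtain ⟨t, hl⟩ : ∃ t, line.head? = some t := by
        cases hl : line.head? with
        | none => exact absurd (List.head?_eq_none_iff.mp hl) hline
        | some t => exact ⟨t, rfl⟩
      have hget : PySem.List.pyGet? line 0 = some t := by
        rw [PySem.List.pyGet?_zero, ← List.head?_eq_getElem?, hl]
      by_cases ht1 : t = "if"
      · subst ht1
        obtain ⟨hsuf1, hok1, heq1⟩ := pb_spec f rs hrs i (i+1) (cond.insert i []) []
        have hred : topB (f+1) i (line :: rs) cond
            = topB f (pbLoop f i (i+1) rs (cond.insert i [])).1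
                (pbLoop f i (i+1) rs (cond.insert i [])).2.1
                (pbLoop f i (i+1) rs (cond.insert i [])).2.2 := by
          simp only [topB, hl]; simp
        rw [hred, List.foldl_cons]
        have hstep : stepA (some (([] : List Int), cond, i)) line
            = some (([] : List Int) ++ [i], cond.insert i [], i + 1) := by
          simp [stepA, hget]
        rw [hstep]
        have hokrs : POk 1 rs := by simpa [POk, hl] using hok
        rw [heq1 hnrs]
        exact ih (pbLoop f i (i+1) rs (cond.insert i [])).2.1
          (le_trans hsuf1.length_le hrs)
          (fun l hml => hnrs l (hsuf1.mem hml)) (hok1 0 hokrs) _ _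
      · have ht2 : t ≠ "else" := by
          intro h; subst h
          have := hok; simp [POk, hl] at this
        have ht3 : t ≠ "end" := by
          intro h; subst h
          have := hok; simp [POk, hl] at this
        have hokrs : POk 0 rs := by simpa [POk, hl, ht1, ht2, ht3] using hok
        have hred : topB (f+1) i (line :: rs) cond = topB f (i+1) rs cond := by
          simp only [topB, hl]; simp [ht1]
        rw [hred, List.foldl_cons]
        have hstep : stepA (some (([] : List Int), cond, i)) line
            = some (([] : List Int), cond, i + 1) := by
          simp [stepA, hget, ht1, ht2, ht3]
        rw [hstep]
        exact ih rs hrs hnrs hokrs _ _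

-- ===== VERDICT (by name: the statement is the Claim_ definition above) =====
theorem cache_conditional_jumps_spec : Claim_equal_cache_conditional_jumps := by
  intro lines _ hpre
  unfold Spec_cache_conditional_jumps cache_conditional_jumps cache_conditional_jumps_alt
  exact top_spec (lines.length + 1) lines (by omega) hpre.1
    (pre_to_POk lines 0 (by simpa using hpre.2)) 0 PySem.Dict.empty
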